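-- pv_equiv track=rewrite | github.com/FedericoDang95/product-categorizer-seo | src/nlp_analyzer.py | _group_years
-- ===== SOURCE A (Python) =====
-- from typing import Dict, List, Tuple, Optional, Set
--
-- def _group_years(years: List[int]) -> List[str]:
--     """Raggruppa anni in range logici"""
--     if not years:
--         return []
--
--     years = sorted(set(years))
--     ranges = []
--
--     if len(years) == 1:
--         return [str(years[0])]
--
--     # Crea range per decenni
--     decades = {}
--     for year in years:
--         decade = (year // 10) * 10
--         if decade not in decades:
--             decades[decade] = []
--         decades[decade].append(year)
--
--     for decade, decade_years in decades.items():
--         if len(decade_years) > 1: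
--             ranges.append(f"{min(decade_years)}-{max(decade_years)}")
--         else:
--             ranges.append(str(decade_years[0]))
--
--     return ranges
-- ===== SOURCE B (Python) =====
-- from typing import List
--
-- def _group_years(years: List[int]) -> List[str]:
--     """Raggruppa anni in range logici"""
--     if not years:
--         return []
--     ys = sorted(set(years))
--     # ys is strictly increasing, so each decade is one contiguous run:
--     # split off run after run; a run's first element is its min, its last its max.
--     out = []
--     i = 0
--     n = len(ys)
--     while i < n:
--         head = ys[i]
--         j = i + 1
--         while j < n and ys[j] // 10 == head // 10:
--             j += 1
--         out.append(str(head) if j == i + 1 else f"{head}-{ys[j - 1]}")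
--         i = j
--     return out
-- ===== Notes on version B (the rewrite author's own statement) =====
-- stated objective: simpler
-- what changed: Drops A's decade dict and its per-decade min/max scans: since sorted(set(years)) is strictly increasing, each decade is a contiguous run, so B scans the sorted list once, splitting off each run and labelling it with its first and last element (A's len==1 fast path is subsumed).
import Mathlib
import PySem

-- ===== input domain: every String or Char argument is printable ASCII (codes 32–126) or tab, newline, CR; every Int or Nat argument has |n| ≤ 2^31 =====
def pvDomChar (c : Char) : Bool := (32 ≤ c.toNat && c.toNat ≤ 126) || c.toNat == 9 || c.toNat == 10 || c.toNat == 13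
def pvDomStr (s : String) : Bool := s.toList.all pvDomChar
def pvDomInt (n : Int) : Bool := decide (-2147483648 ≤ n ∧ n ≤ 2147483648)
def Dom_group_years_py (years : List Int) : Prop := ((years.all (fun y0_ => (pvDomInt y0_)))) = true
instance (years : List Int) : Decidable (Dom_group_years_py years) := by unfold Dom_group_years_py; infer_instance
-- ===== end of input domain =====

-- B replaces A's decade dict and its per-decade min/max scans by one run-splitting pass
-- over the strictly increasing list sorted(set(years)); return values are proved equal.

-- ===== PORT A =====
-- A's decade key (year // 10) * 10
def pvDec (y : Int) : Int := PySem.Int.floordiv y 10 * 10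

-- body of A's output loop: "min-max" when more than one year, else str of the single year
def pvFmtA (dys : List Int) : String :=
  if 1 < dys.length then
    match PySem.List.min? dys (fun x => x), PySem.List.max? dys (fun x => x) with
    | some m, some M => PySem.Int.toStr m ++ "-" ++ PySem.Int.toStr M
    | _, _ => ""   -- unreachable: every dict value is a nonempty list
  else PySem.Int.toStr (PySem.List.pyGetD dys 0 0)

def group_years_py (years : List Int) : List String :=
  if years = [] then []
  else
    let ys := PySem.List.sorted (PySem.Set.ofList years) (fun x => x) false
    if ys.length = 1 then [PySem.Int.toStr (PySem.List.pyGetD ys 0 0)]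
    else
      -- "if decade not in decades: decades[decade] = []; decades[decade].append(year)"
      -- is Dict.modify with default []
      let decades := ys.foldl (fun d y => d.modify (pvDec y) [] (fun l => l ++ [y])) PySem.Dict.empty
      decades.items.map (fun q => pvFmtA q.2)

-- ===== PORT B =====
-- B's outer while loop, one iteration per run of the suffix ys[i:]; the inner while
-- advances j over the head's decade, so j - i = (length of the takeWhile prefix) + 1
def pvRuns (ys : List Int) : List String :=
  match ys with
  | [] => []
  | y :: rest =>
    let t := rest.takeWhile (fun z => PySem.Int.floordiv z 10 == PySem.Int.floordiv y 10)
    let k := t.length + 1   -- j - i at the inner loop's exit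
    let label := if k = 1 then PySem.Int.toStr y
                 else PySem.Int.toStr y ++ "-" ++ PySem.Int.toStr (PySem.List.pyGetD (y :: rest) ((k : Int) - 1) 0)
    label :: pvRuns (rest.drop t.length)   -- continue at i = j
termination_by ys.length
decreasing_by simp

def group_years_py_alt (years : List Int) : List String :=
  if years = [] then []
  else pvRuns (PySem.List.sorted (PySem.Set.ofList years) (fun x => x) false)

-- ===== PRECONDITION & SPEC =====
def Spec_group_years_py (years : List Int) (out : List String) : Prop := out = group_years_py_alt years
instance (years : List Int) (out : List String) : Decidable (Spec_group_years_py years out) := by unfold Spec_group_years_py; infer_instance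

-- ===== CLAIM (what is proved, stated in full; the proofs are below) =====
def Claim_equal_group_years_py : Prop := ∀ (years : List Int), Dom_group_years_py years → Spec_group_years_py years (group_years_py years)

-- ===== LEMMAS AND PROOFS =====

theorem pv_fd_mono {a b : Int} (h : a ≤ b) : PySem.Int.floordiv a 10 ≤ PySem.Int.floordiv b 10 := by
  rw [PySem.Int.floordiv_eq_ediv_of_pos (by norm_num), PySem.Int.floordiv_eq_ediv_of_pos (by norm_num)]
  exact Int.ediv_le_ediv (by norm_num) h

theorem pv_add_of_mem {s : List Int} {a : Int} (hs : a ∈ s) (x : Int) : a ∈ PySem.Set.add s x := by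
  unfold PySem.Set.add; split <;> simp [hs]

theorem pv_foldl_add_filter (a : Int) : ∀ (m s : List Int), a ∈ s →
    m.foldl PySem.Set.add s = (m.filter (fun x => !(x == a))).foldl PySem.Set.add s := by
  intro m
  induction m with
  | nil => intro s _; rfl
  | cons x m ih =>
    intro s hs
    by_cases hx : x = a
    · subst hx
      have hadd : PySem.Set.add s x = s := by
        unfold PySem.Set.add; rw [if_pos ((PySem.Set.contains_iff s x).mpr hs)]
      simp only [List.filter_cons, beq_self_eq_true, Bool.not_true, List.foldl_cons, hadd]
      exact ih s hs
    · have : (!(x == a)) = true := by simp [hx]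
      simp only [List.filter_cons, this, if_pos, List.foldl_cons]
      exact ih _ (pv_add_of_mem hs x)

theorem pv_foldl_add_cons (a : Int) : ∀ (l s : List Int), (∀ x ∈ l, x ≠ a) →
    l.foldl PySem.Set.add (a :: s) = a :: l.foldl PySem.Set.add s := by
  intro l
  induction l with
  | nil => intro s _; rfl
  | cons x l ih =>
    intro s hl
    have hx : x ≠ a := hl x (by simp)
    simp only [List.foldl_cons]
    have hstep : PySem.Set.add (a :: s) x = a :: PySem.Set.add s x := by
      unfold PySem.Set.add
      have hc : PySem.Set.contains (a :: s) x = PySem.Set.contains s x := by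
        by_cases h : x ∈ s
        · rw [(PySem.Set.contains_iff _ x).mpr h, (PySem.Set.contains_iff _ x).mpr (by simp [h])]
        · have h1 : x ∉ a :: s := by simp [hx, h]
          rw [Bool.eq_iff_iff, PySem.Set.contains_iff, PySem.Set.contains_iff]
          simp [h, h1]
      rw [hc]; split <;> simp
    rw [hstep, ih _ (fun z hz => hl z (by simp [hz]))]

theorem pv_dedup_cons (a : Int) (m : List Int) :
    PySem.List.dedup (a :: m) = a :: PySem.List.dedup (m.filter (fun x => !(x == a))) := by
  rw [PySem.List.dedup_eq_ofList, PySem.List.dedup_eq_ofList, PySem.Set.ofList_eq_foldl,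
      PySem.Set.ofList_eq_foldl]
  simp only [List.foldl_cons]
  have h1 : PySem.Set.add [] a = [a] := rfl
  rw [h1, pv_foldl_add_filter a m [a] (by simp)]
  exact pv_foldl_add_cons a _ [] (by intro x hx; simpa using (List.of_mem_filter hx))


theorem pv_foldl_min (y : Int) : ∀ t : List Int, (∀ z ∈ t, y ≤ z) → t.foldl min y = y := by
  intro t
  induction t generalizing y with
  | nil => intro _; rfl
  | cons x t ih =>
    intro h
    simp only [List.foldl_cons, min_eq_left (h x (by simp))]
    exact ih y (fun z hz => h z (by simp [hz]))

theorem pv_foldl_max : ∀ (t : List Int) (y : Int), (y :: t).Pairwise (· < ·) →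
    t.foldl max y = ((y :: t).getLast?).getD 0 := by
  intro t
  induction t with
  | nil => intro y _; rfl
  | cons x t ih =>
    intro y hp
    have hyx : y < x := (List.pairwise_cons.mp hp).1 x (by simp)
    have hp' : (x :: t).Pairwise (· < ·) := (List.pairwise_cons.mp hp).2
    simp only [List.foldl_cons, max_eq_right hyx.le, List.getLast?_cons_cons]
    exact ih x hp'

theorem pv_getD_run : ∀ (t : List Int) (y : Int) (r : List Int),
    (y :: (t ++ r)).getD t.length 0 = ((y :: t).getLast?).getD 0 := by
  intro t
  induction t with
  | nil => intro y r; rfl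
  | cons x t ih =>
    intro y r
    simp only [List.cons_append, List.length_cons, List.getD_cons_succ, List.getLast?_cons_cons]
    exact ih x r

theorem pv_dropWhile_gt (c : Int) : ∀ (l : List Int), l.Pairwise (· < ·) →
    (∀ z ∈ l, c ≤ PySem.Int.floordiv z 10) →
    ∀ z ∈ l.dropWhile (fun z => PySem.Int.floordiv z 10 == c), c < PySem.Int.floordiv z 10 := by
  intro l
  induction l with
  | nil => intro _ _ z hz; simp at hz
  | cons x l ih =>
    intro hp hb z hz
    by_cases hx : PySem.Int.floordiv x 10 = c
    · rw [List.dropWhile_cons, if_pos (by simpa using hx)] at hz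
      exact ih (List.pairwise_cons.mp hp).2 (fun w hw => hb w (by simp [hw])) z hz
    · rw [List.dropWhile_cons, if_neg (by simpa using hx)] at hz
      have hcx : c < PySem.Int.floordiv x 10 :=
        lt_of_le_of_ne (hb x (by simp)) (fun h => hx h.symm)
      rcases List.mem_cons.mp hz with h | h
      · exact h ▸ hcx
      · exact lt_of_lt_of_le hcx (pv_fd_mono ((List.pairwise_cons.mp hp).1 z h).le)

theorem pv_main : ∀ (n : Nat) (ys : List Int), ys.length ≤ n → ys.Pairwise (· < ·) →
    (PySem.List.dedup (ys.map pvDec)).map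
      (fun kk => pvFmtA (ys.filter (fun y => pvDec y == kk))) = pvRuns ys := by
  intro n
  induction n with
  | zero =>
    intro ys hlen _
    have h0 : ys = [] := List.length_eq_zero_iff.mp (Nat.le_zero.mp hlen)
    subst h0
    rw [pvRuns]
    simp [PySem.List.dedup_eq_ofList, PySem.Set.ofList_eq_foldl]
  | succ n ih =>
    intro ys hlen hp
    match ys with
    | [] =>
      rw [pvRuns]
      simp [PySem.List.dedup_eq_ofList, PySem.Set.ofList_eq_foldl]
    | y :: rest =>
      have hpr : rest.Pairwise (· < ·) := (List.pairwise_cons.mp hp).2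
      have hhead : ∀ z ∈ rest, y < z := (List.pairwise_cons.mp hp).1
      set p : Int → Bool := fun z => PySem.Int.floordiv z 10 == PySem.Int.floordiv y 10 with hpdef
      set t := rest.takeWhile p with htdef
      set r := rest.dropWhile p with hrdef
      have hrest : rest = t ++ r := (List.takeWhile_append_dropWhile).symm
      have ht : ∀ z ∈ t, PySem.Int.floordiv z 10 = PySem.Int.floordiv y 10 := by
        intro z hz
        have h2 := List.mem_takeWhile_imp hz
        rw [hpdef] at h2
        exact beq_iff_eq.mp h2
      have hble : ∀ z ∈ rest, PySem.Int.floordiv y 10 ≤ PySem.Int.floordiv z 10 := by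
        intro z hz; exact pv_fd_mono (hhead z hz).le
      have hr : ∀ z ∈ r, PySem.Int.floordiv y 10 < PySem.Int.floordiv z 10 :=
        pv_dropWhile_gt (PySem.Int.floordiv y 10) rest hpr hble
      -- '/'-normal forms for omega
      have HT : ∀ z ∈ t, z / 10 = y / 10 := by
        intro z hz; have := ht z hz; simpa using this
      have HR : ∀ z ∈ r, y / 10 < z / 10 := by
        intro z hz; have := hr z hz; simpa using this
      have hdrop : rest.drop t.length = r := by rw [hrest, List.drop_left]
      have hfilter_head : (y :: rest).filter (fun z => pvDec z == pvDec y) = y :: t := by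
        rw [hrest]
        simp only [List.filter_cons, List.filter_append]
        have h1 : (pvDec y == pvDec y) = true := by simp
        rw [h1]
        have h2 : t.filter (fun z => pvDec z == pvDec y) = t := by
          apply List.filter_eq_self.mpr
          intro z hz
          have := HT z hz
          simp [pvDec]; omega
        have h3 : r.filter (fun z => pvDec z == pvDec y) = [] := by
          apply List.filter_eq_nil_iff.mpr
          intro z hz
          have := HR z hz
          simp [pvDec]; omega
        rw [h2, h3]; simp
      have hdedup : PySem.List.dedup ((y :: rest).map pvDec)
          = pvDec y :: PySem.List.dedup (r.map pvDec) := by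
        rw [List.map_cons, pv_dedup_cons]
        congr 1
        rw [List.filter_map]
        have heq : rest.filter ((fun x => !(x == pvDec y)) ∘ pvDec) = r := by
          rw [hrest, List.filter_append]
          have h2 : t.filter ((fun x => !(x == pvDec y)) ∘ pvDec) = [] := by
            apply List.filter_eq_nil_iff.mpr
            intro z hz
            have := HT z hz
            simp [pvDec]; omega
          have h3 : r.filter ((fun x => !(x == pvDec y)) ∘ pvDec) = r := by
            apply List.filter_eq_self.mpr
            intro z hz
            have := HR z hz
            simp [pvDec]; omega
          rw [h2, h3]; simp
        rw [heq]
      have htail : ∀ kk ∈ PySem.List.dedup (r.map pvDec),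
          (y :: rest).filter (fun z => pvDec z == kk) = r.filter (fun z => pvDec z == kk) := by
        intro kk hkk
        have hmem : kk ∈ r.map pvDec := (PySem.List.mem_dedup _ _).mp hkk
        obtain ⟨z0, hz0, hkkeq⟩ := List.mem_map.mp hmem
        have hz0gt : y / 10 < z0 / 10 := HR z0 hz0
        rw [hrest, List.filter_cons, List.filter_append]
        have h1 : (pvDec y == kk) = false := by
          rw [← hkkeq]
          simp [pvDec]; omega
        have h2 : t.filter (fun z => pvDec z == kk) = [] := by
          apply List.filter_eq_nil_iff.mpr
          intro z hz
          have := HT z hz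
          rw [← hkkeq]
          simp [pvDec]; omega
        rw [h1, h2]
        simp
      rw [pvRuns]
      simp only [← htdef, ← hpdef, hdrop]
      rw [hdedup, List.map_cons, hfilter_head]
      congr 1
      · by_cases htt : t = []
        · rw [htt]
          simp [pvFmtA, PySem.List.pyGetD_zero_cons]
        · have h0 : 0 < t.length := List.length_pos_iff.mpr htt
          have hlen1 : 1 < (y :: t).length := by
            simp only [List.length_cons]; omega
          have hsub : List.Sublist (y :: t) (y :: rest) := by
            rw [hrest]
            exact List.Sublist.cons₂ y (List.sublist_append_left t r)
          have hpyt : (y :: t).Pairwise (· < ·) := hp.sublist hsub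
          have hmin : PySem.List.min? (y :: t) (fun x => x) = some y := by
            rw [PySem.List.min?_id_cons]
            congr 1
            exact pv_foldl_min y t (fun z hz => ((List.pairwise_cons.mp hpyt).1 z hz).le)
          have hmax : PySem.List.max? (y :: t) (fun x => x)
              = some (((y :: t).getLast?).getD 0) := by
            rw [PySem.List.max?_id_cons]
            congr 1
            exact pv_foldl_max t y hpyt
          have hk1 : ¬ (t.length + 1 = 1) := by omega
          rw [if_neg hk1, pvFmtA, if_pos hlen1, hmin, hmax]
          have hidx : ((t.length + 1 : Nat) : Int) - 1 = (t.length : Int) := by push_cast; ring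
          rw [hidx, PySem.List.pyGetD_natCast]
          rw [hrest, pv_getD_run]
      · rw [List.map_congr_left (fun kk hkk => by rw [htail kk hkk])]
        apply ih r _ (hpr.sublist (hrest ▸ List.sublist_append_right t r))
        have h5 : r.length ≤ rest.length := by
          rw [hrest]; simp
        have h6 : rest.length ≤ n := by simpa using hlen
        omega

theorem pv_items_char (ys : List Int) :
    (ys.foldl (fun d y => d.modify (pvDec y) [] (fun l => l ++ [y])) PySem.Dict.empty).items.map (fun q => pvFmtA q.2)
    = (PySem.List.dedup (ys.map pvDec)).map
        (fun kk => pvFmtA (ys.filter (fun y => pvDec y == kk))) := by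
  set d := ys.foldl (fun d y => d.modify (pvDec y) [] (fun l => l ++ [y])) PySem.Dict.empty with hd
  have hnd : d.keys.Nodup := by
    rw [hd]
    exact PySem.Dict.nodup_keys_foldl_modify_key ys pvDec [] (fun d x => fun l => l ++ [x])
      PySem.Dict.empty (by simp)
  have hkeys : d.keys = PySem.List.dedup (ys.map pvDec) := by
    rw [hd, PySem.Dict.keys_foldl_modify_key]
    rw [PySem.List.dedup_eq_ofList]
    simp [PySem.Dict.keys_empty, PySem.Set.update_nil_left]
  have hgetD : ∀ kk, d.getD kk [] = ys.filter (fun y => pvDec y == kk) := by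
    intro kk
    have hfold : d = (ys.map (fun y => (pvDec y, y))).foldl
        (fun d q => d.modify q.1 [] (fun l => l ++ [q.2])) PySem.Dict.empty := by
      rw [hd, List.foldl_map]
    rw [hfold, PySem.Dict.getD_foldl_modify_append]
    rw [List.filter_map, List.map_map]
    rw [PySem.Dict.getD_empty, List.nil_append]
    have hmapid : List.map ((fun (x : Int × Int) => x.2) ∘ fun y => (pvDec y, y))
        (List.filter ((fun (p : Int × Int) => p.1 == kk) ∘ fun y => (pvDec y, y)) ys)
        = List.map id (List.filter ((fun (p : Int × Int) => p.1 == kk) ∘ fun y => (pvDec y, y)) ys) := rfl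
    rw [hmapid, List.map_id]
    rfl
  rw [PySem.Dict.items_eq_map_keys d hnd ([] : List Int), List.map_map, hkeys]
  apply List.map_congr_left
  intro kk _
  simp only [Function.comp_apply, hgetD kk]

-- ===== VERDICT (by name: the statement is the Claim_ definition above) =====
theorem group_years_py_spec : Claim_equal_group_years_py := by
  unfold Claim_equal_group_years_py Spec_group_years_py
  intro years _
  unfold group_years_py group_years_py_alt
  by_cases hy : years = []
  · simp [hy]
  · rw [if_neg hy, if_neg hy]
    set ys := PySem.List.sorted (PySem.Set.ofList years) (fun x => x) false with hys
    have hpw : ys.Pairwise (· < ·) := PySem.List.sorted_ofList_pairwise_lt years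
    have hmain := pv_main ys.length ys le_rfl hpw
    by_cases hone : ys.length = 1
    · rw [if_pos hone]
      obtain ⟨a, ha⟩ := List.length_eq_one_iff.mp hone
      rw [ha, pvRuns]
      simp [PySem.List.pyGetD_zero_cons, pvRuns]
    · rw [if_neg hone]
      rw [pv_items_char ys, hmain]
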